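-- pv_equiv track=rewrite | github.com/itachi-hue/argus | server/src/argus/core/stack_parser.py | _is_app_code
-- ===== SOURCE A (Python) =====
-- def _is_app_code(url: str, file_path: str) -> bool:
--     """Heuristic: is this frame from the user's app or third-party?"""
--     skip_patterns = (
--         "node_modules",
--         "cdn.",
--         "cdnjs.",
--         "unpkg.com",
--         "jsdelivr.net",
--         "googleapis.com",
--         "polyfill",
--         "chrome-extension://",
--         "moz-extension://",
--         "<anonymous>",
--         "webpack/bootstrap",
--         "webpack/runtime",
--         "react-dom",
--         "react.production",
--         "react.development",
--         "scheduler.development",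
--         "scheduler.production",
--         "vendor.",
--         "chunk-vendors",
--     )
--     combined = url + file_path
--     return not any(p in combined.lower() for p in skip_patterns)
-- ===== SOURCE B (Python) =====
-- _SKIP = (
--     "node_modules",
--     "cdn.",
--     "cdnjs.",
--     "unpkg.com",
--     "jsdelivr.net",
--     "googleapis.com",
--     "polyfill",
--     "chrome-extension://",
--     "moz-extension://",
--     "<anonymous>",
--     "webpack/bootstrap",
--     "webpack/runtime",
--     "react-dom",
--     "react.production",
--     "react.development",
--     "scheduler.development",
--     "scheduler.production",
--     "vendor.",
--     "chunk-vendors",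
-- )
--
--
-- def _is_app_code(url: str, file_path: str) -> bool:
--     """Heuristic: is this frame from the user's app or third-party?
--
--     Single left-to-right sweep over the combined string: at each position
--     test whether any skip pattern starts there, instead of running one
--     independent substring search per pattern.
--     """
--     s = (url + file_path).lower()
--     for i in range(len(s)):
--         for p in _SKIP:
--             if s.startswith(p, i):
--                 return False
--     return True
-- ===== Notes on version B (the rewrite author's own statement) =====
-- stated objective: alternative
-- what changed: Replaces 19 independent 'pattern in combined' substring searches with a single position-major sweep of the combined lowered string that tests at each index whether any pattern starts there (early exit on first hit).
import Mathlib
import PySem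

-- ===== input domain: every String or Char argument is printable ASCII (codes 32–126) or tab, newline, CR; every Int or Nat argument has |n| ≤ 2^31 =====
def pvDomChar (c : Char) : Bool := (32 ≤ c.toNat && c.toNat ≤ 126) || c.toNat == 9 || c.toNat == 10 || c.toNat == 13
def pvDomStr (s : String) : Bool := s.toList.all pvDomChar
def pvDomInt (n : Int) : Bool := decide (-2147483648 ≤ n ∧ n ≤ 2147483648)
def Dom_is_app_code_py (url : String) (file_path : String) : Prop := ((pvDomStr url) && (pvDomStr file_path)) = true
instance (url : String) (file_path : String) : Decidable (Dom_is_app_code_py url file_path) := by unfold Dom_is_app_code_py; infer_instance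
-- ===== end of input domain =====

-- B replaces the per-pattern 'in' substring searches by one position-major sweep of the
-- combined lowered string (alternative decomposition, same cost class).

-- ===== PORT A =====
-- the skip_patterns tuple of A
def pySkipPatterns : List String :=
  ["node_modules", "cdn.", "cdnjs.", "unpkg.com", "jsdelivr.net", "googleapis.com",
   "polyfill", "chrome-extension://", "moz-extension://", "<anonymous>",
   "webpack/bootstrap", "webpack/runtime", "react-dom", "react.production",
   "react.development", "scheduler.development", "scheduler.production",
   "vendor.", "chunk-vendors"]

def is_app_code_py (url : String) (file_path : String) : Bool :=
  let combined := url ++ file_path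
  !(pySkipPatterns.any (fun p => PySem.Str.isIn p (PySem.Str.lower combined)))

-- ===== PORT B =====
-- the _SKIP tuple of B
def altSkip : List String :=
  ["node_modules", "cdn.", "cdnjs.", "unpkg.com", "jsdelivr.net", "googleapis.com",
   "polyfill", "chrome-extension://", "moz-extension://", "<anonymous>",
   "webpack/bootstrap", "webpack/runtime", "react-dom", "react.production",
   "react.development", "scheduler.development", "scheduler.production",
   "vendor.", "chunk-vendors"]

-- the 'for i in range(len(s))' loop, iterating over the successive suffixes of s;
-- 's.startswith(p, i)' is p.toList.isPrefixOf (suffix at i)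
def altSweep (cs : List Char) : Bool :=
  match cs with
  | [] => true
  | c :: rest =>
    if altSkip.any (fun p => p.toList.isPrefixOf (c :: rest)) then false
    else altSweep rest

def is_app_code_py_alt (url : String) (file_path : String) : Bool :=
  altSweep (PySem.Str.lower (url ++ file_path)).toList

-- ===== PRECONDITION & SPEC =====
def Spec_is_app_code_py (url : String) (file_path : String) (out : Bool) : Prop := out = is_app_code_py_alt url file_path
instance (url : String) (file_path : String) (out : Bool) : Decidable (Spec_is_app_code_py url file_path out) := by unfold Spec_is_app_code_py; infer_instance

-- ===== CLAIM (what is proved, stated in full; the proofs are below) =====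
def Claim_equal_is_app_code_py : Prop := ∀ (url : String) (file_path : String), Dom_is_app_code_py url file_path → Spec_is_app_code_py url file_path (is_app_code_py url file_path)

-- ===== LEMMAS AND PROOFS =====

-- the sweep computes exactly 'no pattern occurs as a substring'
theorem altSweep_eq_not_any_isIn (cs : List Char) :
    altSweep cs = !(altSkip.any (fun p => PySem.Chars.isIn p.toList cs)) := by
  induction cs with
  | nil => decide
  | cons c rest ih =>
    rw [altSweep]
    by_cases h : altSkip.any (fun p => p.toList.isPrefixOf (c :: rest)) = true
    · rw [if_pos h]
      rcases List.any_eq_true.mp h with ⟨p, hp, hpre⟩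
      have h1 : altSkip.any (fun p => PySem.Chars.isIn p.toList (c :: rest)) = true :=
        List.any_eq_true.mpr ⟨p, hp, (PySem.Chars.isIn_iff_infix _ _).mpr
          (List.IsPrefix.isInfix (List.isPrefixOf_iff_prefix.mp hpre))⟩
      rw [h1]; rfl
    · rw [if_neg h, ih]
      congr 1
      refine Bool.eq_iff_iff.mpr ?_
      simp only [List.any_eq_true]
      constructor
      · rintro ⟨p, hp, h3⟩
        exact ⟨p, hp, (PySem.Chars.isIn_iff_infix _ _).mpr
          (List.infix_cons ((PySem.Chars.isIn_iff_infix _ _).mp h3))⟩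
      · rintro ⟨p, hp, h3⟩
        refine ⟨p, hp, ?_⟩
        rcases List.infix_cons_iff.mp ((PySem.Chars.isIn_iff_infix _ _).mp h3) with h4 | h4
        · exact absurd (List.any_eq_true.mpr ⟨p, hp, List.isPrefixOf_iff_prefix.mpr h4⟩) h
        · exact (PySem.Chars.isIn_iff_infix _ _).mpr h4

-- ===== VERDICT (by name: the statement is the Claim_ definition above) =====
theorem is_app_code_py_spec : Claim_equal_is_app_code_py := by
  intro url file_path _
  unfold Spec_is_app_code_py is_app_code_py is_app_code_py_alt
  rw [altSweep_eq_not_any_isIn]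
  simp only [PySem.Str.isIn_eq]
  rfl
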